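/- GENERATED by c/gen_decode.py: decode facts of the image, one per distinct instruction byte string. -/
import UserX.DecodeImage

#decode_all Vorbis.Dec
  "01c2"  -- add edx,eax
  "0f8268010000"  -- jb 102aca
  "0f84be060000"  -- je 10fb14
  "0f85e1000000"  -- jne 1144ee
  "0f8e69010000"  -- jle 111457
  "0fb6442418"  -- movzx eax,BYTE PTR [rsp+0x18]
  "29d8"  -- sub eax,ebx
  "4080fd4f"  -- cmp bpl,0x4f
  "410fbfde"  -- movsx ebx,r14w
  "4183e5f8"  -- and r13d,0xfffffff8
  "4189d7"  -- mov r15d,edx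
  "41bc01000000"  -- mov r12d,0x1
  "420fb71c63"  -- movzx ebx,WORD PTR [rbx+r12*2]
  "4429f0"  -- sub eax,r14d
  "44893b"  -- mov DWORD PTR [rbx],r15d
  "4489bb80000000"  -- mov DWORD PTR [rbx+0x80],r15d
  "448b73e8"  -- mov r14d,DWORD PTR [rbx-0x18]
  "450fb626"  -- movzx r12d,BYTE PTR [r14]
  "4589c1"  -- mov r9d,r8d
  "460fb7bcac20010000"  -- movzx r15d,WORD PTR [rsp+r13*4+0x120]
  "4839d1"  -- cmp rcx,rdx
  "486bd238"  -- imul rdx,rdx,0x38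
  "4883ec48"  -- sub rsp,0x48
  "48898548ffffff"  -- mov QWORD PTR [rbp-0xb8],rax
  "488b4bc0"  -- mov rcx,QWORD PTR [rbx-0x40]
  "488bb3a8000000"  -- mov rsi,QWORD PTR [rbx+0xa8]
  "488d5cab04"  -- lea rbx,[rbx+rbp*4+0x4]
  "488d7d28"  -- lea rdi,[rbp+0x28]
  "488dbb8c000000"  -- lea rdi,[rbx+0x8c]
  "488dbdd0010000"  -- lea rdi,[rbp+0x1d0]
  "48c7442438000b1200"  -- mov QWORD PTR [rsp+0x38],0x120b00
  "490fafdd"  -- imul rbx,r13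
  "4989c4"  -- mov r12,rax
  "498d7c2407"  -- lea rdi,[r12+0x7]
  "498dbcc698050000"  -- lea rdi,[r14+rax*8+0x598]
  "4a8d3ca580061200"  -- lea rdi,[r12*4+0x120680]
  "4c037528"  -- add r14,QWORD PTR [rbp+0x28]
  "4c897c2428"  -- mov QWORD PTR [rsp+0x28],r15
  "4c8b742428"  -- mov r14,QWORD PTR [rsp+0x28]
  "4c8d786c"  -- lea r15,[rax+0x6c]
  "4d89e8"  -- mov r8,r13
  "4f8d7cb504"  -- lea r15,[r13+r14*4+0x4]
  "66410f6ec5"  -- movd xmm0,r13d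
  "6646896c6504"  -- mov WORD PTR [rbp+r12*2+0x4],r13w
  "740b"  -- je 1148d0
  "74b4"  -- je 10b3c6
  "7617"  -- jbe 102cdc
  "7d52"  -- jge 104aad
  "7f61"  -- jg 104172
  "8344240c01"  -- add DWORD PTR [rsp+0xc],0x1
  "83fbff"  -- cmp ebx,0xffffffff
  "895c2478"  -- mov DWORD PTR [rsp+0x78],ebx
  "89d0"  -- mov eax,edx
  "8b4c2448"  -- mov ecx,DWORD PTR [rsp+0x48]
  "8b8544ffffff"  -- mov eax,DWORD PTR [rbp-0xbc]
  "8db8ecfcffff"  -- lea edi,[rax-0x314]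
  "c1e008"  -- shl eax,0x8
  "c7800400c000f1f104f2"  -- mov DWORD PTR [rax+0xc00004],0xf204f1f1
  "c785e806000000000000"  -- mov DWORD PTR [rbp+0x6e8],0x0
  "e807fdfeff"  -- call 103ea0
  "e811a2feff"  -- call 1003c0
  "e81bbeffff"  -- call 100300
  "e8254fffff"  -- call 100300
  "e82decfeff"  -- call 100640
  "e838a4feff"  -- call 100640
  "e843c1ffff"  -- call 100640
  "e84da1feff"  -- call 1003c0
  "e858f1feff"  -- call 103d00
  "e8666cffff"  -- call 100640
  "e8719efeff"  -- call 100480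
  "e87bc0ffff"  -- call 100640
  "e887f8feff"  -- call 103d00
  "e891f0ffff"  -- call 101da0
  "e89bd0feff"  -- call 100300
  "e8a6a8feff"  -- call 100640
  "e8b039ffff"  -- call 100720
  "e8b9d8feff"  -- call 107060
  "e8c469ffff"  -- call 100640
  "e8cda9ffff"  -- call 104100
  "e8d8bcffff"  -- call 100720
  "e8e1b4ffff"  -- call 100640
  "e8eba5ffff"  -- call 100640
  "e8f415ffff"  -- call 100640
  "e8ffb5ffff"  -- call 100640
  "e940feffff"  -- jmp 10dd70
  "e98cfeffff"  -- jmp 10351d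
  "e9e2010000"  -- jmp 10f2e6
  "eb52"  -- jmp 111886
  "ebd2"  -- jmp 115ccb
  "f20f2cc1"  -- cvttsd2si eax,xmm1
  "f20f5cca"  -- subsd xmm1,xmm2
  "f30f104bc4"  -- movss xmm1,DWORD PTR [rbx-0x3c]
  "f30f106da8"  -- movss xmm5,DWORD PTR [rbp-0x58]
  "f30f114c2414"  -- movss DWORD PTR [rsp+0x14],xmm1
  "f30f116dbc"  -- movss DWORD PTR [rbp-0x44],xmm5
  "f30f58742414"  -- addss xmm6,DWORD PTR [rsp+0x14]
  "f30f59c8"  -- mulss xmm1,xmm0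
  "f30f5cf5"  -- subss xmm6,xmm5
  "f3410f11660c"  -- movss DWORD PTR [r14+0xc],xmm4
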